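-- pv_equiv track=rewrite | github.com/JaehoonShin2/coding-test | Programmers/문제풀이/Level_1/Level1_푸드 파이터 대회.py | solution
-- ===== SOURCE A (Python) =====
-- def solution(food):
--     answer = ['0']
--     for i in reversed(range(len(food))):
--         f = food[i] // 2
--         if f > 0:
--             new_f = f * str(i)
--             answer.insert(0, new_f)
--             answer.append(new_f)
--
--     return ''.join(answer)
-- ===== SOURCE B (Python) =====
-- def solution(food):
--     # divide-and-conquer: fwd(lo,hi) = blocks lo..hi-1 in increasing order,
--     # bwd(lo,hi) = the same blocks in decreasing order; answer = fwd + '0' + bwd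
--     def fwd(lo, hi):
--         if hi <= lo:
--             return ''
--         if hi - lo == 1:
--             return str(lo) * (food[lo] // 2)
--         mid = (lo + hi) // 2
--         return fwd(lo, mid) + fwd(mid, hi)
--
--     def bwd(lo, hi):
--         if hi <= lo:
--             return ''
--         if hi - lo == 1:
--             return str(lo) * (food[lo] // 2)
--         mid = (lo + hi) // 2
--         return bwd(mid, hi) + bwd(lo, mid)
--
--     n = len(food)
--     return fwd(0, n) + '0' + bwd(0, n)
-- ===== Notes on version B (the rewrite author's own statement) =====
-- stated objective: alternative
-- what changed: Replaces A's backward loop mutating a shared list at both ends (insert(0)/append then join) with a balanced divide-and-conquer over index ranges: fwd(lo,hi)/bwd(lo,hi) split at the midpoint and concatenate the two halves, and the answer is fwd(0,n) + '0' + bwd(0,n); no list, no mutation, no join, O(log n) recursion depth.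
import Mathlib
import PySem

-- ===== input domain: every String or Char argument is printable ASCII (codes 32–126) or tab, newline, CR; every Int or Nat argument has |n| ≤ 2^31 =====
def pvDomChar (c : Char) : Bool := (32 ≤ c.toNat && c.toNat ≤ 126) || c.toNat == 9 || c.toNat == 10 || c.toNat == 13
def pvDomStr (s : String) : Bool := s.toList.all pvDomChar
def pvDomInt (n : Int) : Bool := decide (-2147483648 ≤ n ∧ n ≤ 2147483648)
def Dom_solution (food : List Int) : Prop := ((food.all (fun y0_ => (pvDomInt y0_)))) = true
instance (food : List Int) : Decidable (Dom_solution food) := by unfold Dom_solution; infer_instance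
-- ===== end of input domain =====

-- B replaces A's backward loop mutating a list at both ends with a balanced divide-and-conquer
-- over index ranges (fwd/bwd split at the midpoint); return values proved equal.

-- Python's  s * n  for a string s and int n (empty for n ≤ 0) — exact
def pyStrMul (s : String) (n : Int) : String := String.ofList (PySem.List.pyRepeat s.toList n)

-- ===== PORT A =====
-- the body of A's for-loop (insert(0, new_f); append(new_f))
def solStep (food : List Int) (answer : List String) (i : Nat) : List String :=
  let f := PySem.Int.floordiv (food.getD i 0) 2
  if f > 0 then
    let new_f := pyStrMul (PySem.Int.toStr (Int.ofNat i)) f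
    new_f :: (answer ++ [new_f])
  else answer

def solution (food : List Int) : String :=
  PySem.Str.join "" (((List.range food.length).reverse).foldl (solStep food) ["0"])

-- ===== PORT B =====
-- fwd(lo,hi): blocks lo..hi-1 in increasing order, by midpoint split
def fwdGo (food : List Int) (lo hi : Nat) : String :=
  if hi ≤ lo then ""
  else if hi - lo = 1 then
    pyStrMul (PySem.Int.toStr (Int.ofNat lo)) (PySem.Int.floordiv (food.getD lo 0) 2)
  else
    fwdGo food lo ((lo + hi) / 2) ++ fwdGo food ((lo + hi) / 2) hi
termination_by hi - lo
decreasing_by all_goals omega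

-- bwd(lo,hi): the same blocks in decreasing order
def bwdGo (food : List Int) (lo hi : Nat) : String :=
  if hi ≤ lo then ""
  else if hi - lo = 1 then
    pyStrMul (PySem.Int.toStr (Int.ofNat lo)) (PySem.Int.floordiv (food.getD lo 0) 2)
  else
    bwdGo food ((lo + hi) / 2) hi ++ bwdGo food lo ((lo + hi) / 2)
termination_by hi - lo
decreasing_by all_goals omega

def solution_alt (food : List Int) : String :=
  fwdGo food 0 food.length ++ "0" ++ bwdGo food 0 food.length

-- ===== PRECONDITION & SPEC =====
def Spec_solution (food : List Int) (out : String) : Prop := out = solution_alt food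
instance (food : List Int) (out : String) : Decidable (Spec_solution food out) := by unfold Spec_solution; infer_instance

-- ===== CLAIM (what is proved, stated in full; the proofs are below) =====
def Claim_equal_solution : Prop := ∀ (food : List Int), Dom_solution food → Spec_solution food (solution food)

-- ===== LEMMAS AND PROOFS =====

-- the (possibly empty) character block at index i
def blockChars (food : List Int) (i : Nat) : List Char :=
  PySem.List.pyRepeat (PySem.Int.toStr (Int.ofNat i)).toList (PySem.Int.floordiv (food.getD i 0) 2)

-- the block A keeps, as an Option (A skips empty blocks)
def blockOf (food : List Int) (i : Nat) : Option String :=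
  if PySem.Int.floordiv (food.getD i 0) 2 > 0 then
    some (pyStrMul (PySem.Int.toStr (Int.ofNat i)) (PySem.Int.floordiv (food.getD i 0) 2))
  else none

-- A's loop invariant: folding solStep over any index list wraps the accumulator with
-- the kept blocks, newest first on the left, in encounter order on the right.
theorem foldl_solStep (food : List Int) :
    ∀ (l : List Nat) (acc : List String),
      l.foldl (solStep food) acc =
        (l.filterMap (blockOf food)).reverse ++ acc ++ l.filterMap (blockOf food) := by
  intro l
  induction l with
  | nil => simp
  | cons i l ih =>
    intro acc
    simp only [List.foldl_cons, ih, List.filterMap_cons, solStep, blockOf]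
    split_ifs with h
    · simp
    · simp

-- ''.join concatenates
theorem chars_join_nil_flatten (l : List (List Char)) :
    PySem.Chars.join [] l = l.flatten := by
  induction l with
  | nil => simp [PySem.Chars.join_nil]
  | cons p l ih =>
    cases l with
    | nil => simp [PySem.Chars.join_singleton]
    | cons q rest => simp [PySem.Chars.join_cons_cons, ih]

-- dropping the skipped (empty) blocks does not change the flattened characters
theorem filterMap_blockOf_flatten (food : List Int) (l : List Nat) :
    ((l.filterMap (blockOf food)).map String.toList).flatten =
      (l.map (blockChars food)).flatten := by
  induction l with
  | nil => simp
  | cons i l ih =>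
    simp only [List.filterMap_cons]
    by_cases h : PySem.Int.floordiv (food.getD i 0) 2 > 0
    · have hb : blockOf food i
          = some (pyStrMul (PySem.Int.toStr (Int.ofNat i)) (PySem.Int.floordiv (food.getD i 0) 2)) := by
        unfold blockOf; rw [if_pos h]
      rw [hb]
      simp only [List.map_cons, List.flatten_cons, ih]
      congr 1
      simp [pyStrMul, blockChars]
    · have hb : blockOf food i = none := by unfold blockOf; rw [if_neg h]
      have hz : (PySem.Int.floordiv (food.getD i 0) 2).toNat = 0 := by omega
      have hc : blockChars food i = [] := by
        unfold blockChars
        rw [show PySem.List.pyRepeat (PySem.Int.toStr (Int.ofNat i)).toList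
              (PySem.Int.floordiv (food.getD i 0) 2)
            = (List.replicate (PySem.Int.floordiv (food.getD i 0) 2).toNat
                (PySem.Int.toStr (Int.ofNat i)).toList).flatten from rfl, hz]
        rfl
      rw [hb]
      simp [hc, ih]

-- B's recursions, characterized over index ranges
theorem fwdGo_chars (food : List Int) :
    ∀ (k lo hi : Nat), hi - lo = k →
      (fwdGo food lo hi).toList =
        ((List.range' lo (hi - lo)).map (blockChars food)).flatten := by
  intro k
  induction k using Nat.strong_induction_on with
  | _ k ih =>
    intro lo hi hk
    rw [fwdGo]
    by_cases h1 : hi ≤ lo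
    · have : hi - lo = 0 := by omega
      simp [h1, this]
    · rw [if_neg h1]
      by_cases h2 : hi - lo = 1
      · rw [if_pos h2, h2]
        simp [List.range', pyStrMul, blockChars]
      · rw [if_neg h2]
        have e1 := ih (((lo + hi) / 2) - lo) (by omega) lo ((lo + hi) / 2) rfl
        have e2 := ih (hi - ((lo + hi) / 2)) (by omega) ((lo + hi) / 2) hi rfl
        have hsplit : List.range' lo (hi - lo)
            = List.range' lo (((lo + hi) / 2) - lo) ++ List.range' ((lo + hi) / 2) (hi - ((lo + hi) / 2)) := by
          have h := @List.range'_append lo ((lo + hi) / 2 - lo) (hi - (lo + hi) / 2) 1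
          simp only [one_mul] at h
          rw [show lo + ((lo + hi) / 2 - lo) = (lo + hi) / 2 from by omega] at h
          rw [h]
          congr 1
          omega
        simp [e1, e2, hsplit]

theorem bwdGo_chars (food : List Int) :
    ∀ (k lo hi : Nat), hi - lo = k →
      (bwdGo food lo hi).toList =
        (((List.range' lo (hi - lo)).map (blockChars food)).reverse).flatten := by
  intro k
  induction k using Nat.strong_induction_on with
  | _ k ih =>
    intro lo hi hk
    rw [bwdGo]
    by_cases h1 : hi ≤ lo
    · have : hi - lo = 0 := by omega
      simp [h1, this]
    · rw [if_neg h1]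
      by_cases h2 : hi - lo = 1
      · rw [if_pos h2, h2]
        simp [List.range', pyStrMul, blockChars]
      · rw [if_neg h2]
        have e1 := ih (hi - ((lo + hi) / 2)) (by omega) ((lo + hi) / 2) hi rfl
        have e2 := ih (((lo + hi) / 2) - lo) (by omega) lo ((lo + hi) / 2) rfl
        have hsplit : List.range' lo (hi - lo)
            = List.range' lo (((lo + hi) / 2) - lo) ++ List.range' ((lo + hi) / 2) (hi - ((lo + hi) / 2)) := by
          have h := @List.range'_append lo ((lo + hi) / 2 - lo) (hi - (lo + hi) / 2) 1
          simp only [one_mul] at h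
          rw [show lo + ((lo + hi) / 2 - lo) = (lo + hi) / 2 from by omega] at h
          rw [h]
          congr 1
          omega
        simp [e1, e2, hsplit]

-- ===== VERDICT (by name: the statement is the Claim_ definition above) =====
theorem solution_spec : Claim_equal_solution := by
  intro food _
  show solution food = solution_alt food
  apply String.ext
  show (solution food).toList = (solution_alt food).toList
  have hF' := fwdGo_chars food food.length 0 food.length (by omega)
  have hB' := bwdGo_chars food food.length 0 food.length (by omega)
  simp only [solution, solution_alt, foldl_solStep, PySem.Str.toList_join]
  rw [show ("" : String).toList = ([] : List Char) from rfl, chars_join_nil_flatten]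
  simp only [List.map_append, List.flatten_append, List.map_reverse, List.filterMap_reverse,
    String.toList_append, hF', hB']
  have hF := filterMap_blockOf_flatten food (List.range food.length)
  have hR := filterMap_blockOf_flatten food (List.range food.length).reverse
  simp only [List.range_eq_range', List.filterMap_reverse, List.map_reverse, Nat.sub_zero] at *
  simp [hF, hR]
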